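-- pv_equiv track=rewrite | github.com/TamasFlorin/hidden_markov_model | src/util.py | observations_from_blocks
-- ===== SOURCE A (Python) =====
-- BLACK_PIXEL = 0
--
-- def observation_from_block(block, keep=3):
--     pixels = []
--     for component in block:
--         black_pixels = sum(
--             [1 for value in component if value == BLACK_PIXEL])
--         pixels.append(black_pixels)
--
--     # make sure we have 3 items
--     if len(pixels) < 3:
--         for _ in range(3 - len(pixels)):
--             pixels.append(0)
--
--     pixels = sorted(pixels, reverse=True)
--     return (pixels[0], pixels[1], pixels[2])
--
-- def map_obs_item_to_class(observation_item, d=10):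
--     if observation_item == 0:
--         return 'None'
--     elif observation_item < d:
--         return 'Small'
--     else:
--         return 'Large'
--
-- def class_triple_to_id(class_triple):
--     m = {
--         ('None', 'None', 'None'): 0,
--         ('Small', 'None', 'None'): 1,
--         ('Small', 'Small', 'None'): 2,
--         ('Small', 'Small', 'Small'): 3,
--         ('None', 'Small', 'None'): 4,
--         ('None', 'None', 'Small'): 5,
--         ('Large', 'None', 'None'): 6,
--         ('Large', 'Large', 'None'): 7,
--         ('Large', 'Small', 'None'): 8,
--         ('Large', 'Small', 'Small'): 9,
--         ('Large', 'Large', 'Small'): 10,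
--         ('Large', 'Large', 'Large'): 11
--     }
--
--     return m[class_triple]
--
-- def observations_from_blocks(blocks):
--     observations = []
--     for block in blocks:
--         observation = observation_from_block(block)
--         item_classes = tuple([map_obs_item_to_class(item)
--                               for item in observation])
--         observation = class_triple_to_id(item_classes)
--         observations.append(observation)
--     return observations
-- ===== SOURCE B (Python) =====
-- BLACK_PIXEL = 0
--
-- _ID_TABLE = {
--     (0, 0): 0, (0, 1): 1, (0, 2): 2, (0, 3): 3,
--     (1, 0): 6, (1, 1): 8, (1, 2): 9,
--     (2, 0): 7, (2, 1): 10,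
--     (3, 0): 11,
-- }
--
-- def observations_from_blocks(blocks):
--     observations = []
--     for block in blocks:
--         n_large = 0
--         n_small = 0
--         for component in block:
--             c = 0
--             for value in component:
--                 if value == BLACK_PIXEL:
--                     c += 1
--             if c >= 10:
--                 n_large += 1
--             elif c >= 1:
--                 n_small += 1
--         nl = min(n_large, 3)
--         ns = min(n_small, 3 - nl)
--         observations.append(_ID_TABLE[(nl, ns)])
--     return observations
-- ===== Notes on version B (the rewrite author's own statement) =====
-- stated objective: simpler
-- what changed: B counts black pixels per component in one pass, buckets the components into two counters (large: count >= 10, small: 1-9), clamps them to the three observation slots and reads the id from a 10-entry (n_large, n_small) table, eliminating A's zero-padding, descending sort, string-triple construction and string-keyed dict.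
import Mathlib
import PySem

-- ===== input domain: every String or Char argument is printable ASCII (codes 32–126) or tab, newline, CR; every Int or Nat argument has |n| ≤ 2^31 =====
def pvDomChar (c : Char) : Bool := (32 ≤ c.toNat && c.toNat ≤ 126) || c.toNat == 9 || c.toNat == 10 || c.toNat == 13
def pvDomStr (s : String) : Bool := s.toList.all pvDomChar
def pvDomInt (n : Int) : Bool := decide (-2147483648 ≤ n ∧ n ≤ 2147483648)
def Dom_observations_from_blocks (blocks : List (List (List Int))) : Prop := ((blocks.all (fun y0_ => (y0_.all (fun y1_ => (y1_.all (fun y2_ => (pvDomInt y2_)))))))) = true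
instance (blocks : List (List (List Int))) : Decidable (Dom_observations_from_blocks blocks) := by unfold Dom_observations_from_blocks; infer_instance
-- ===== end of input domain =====

-- B replaces A's sort/top-3/string-triple/dict pipeline by counting large and small
-- components directly and clamping the two counters into a 10-entry id table (objective: simpler).


-- ===== PORT A =====
-- Python's `observation_from_block(block, keep=3)`: the `keep` parameter is unused in its body
-- and every call site uses the default, so it is dropped here.
def observation_from_block (block : List (List Int)) : Int × Int × Int :=
  let pixels : List Int := block.foldl
    (fun acc component =>
      acc ++ [((component.filter (fun value => value == 0)).map (fun _ => (1 : Int))).sum]) []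
  let pixels : List Int :=
    if pixels.length < 3 then
      (PySem.List.pyRange 0 (3 - (pixels.length : Int)) 1).foldl
        (fun acc _ => acc ++ [(0 : Int)]) pixels
    else pixels
  let pixels := PySem.List.sorted pixels (fun x => x) true
  -- pixels[0], pixels[1], pixels[2] cannot raise: the padding loop guarantees length ≥ 3,
  -- so the defaults of pyGetD are never consulted
  (PySem.List.pyGetD pixels 0 0, PySem.List.pyGetD pixels 1 0, PySem.List.pyGetD pixels 2 0)

def map_obs_item_to_class (observation_item : Int) (d : Int) : String :=
  if observation_item = 0 then "None"
  else if observation_item < d then "Small"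
  else "Large"

def class_triple_to_id (class_triple : String × String × String) : Int :=
  let m : PySem.Dict (String × String × String) Int :=
    (((((((((((PySem.Dict.empty.insert ("None", "None", "None") 0).insert
      ("Small", "None", "None") 1).insert
      ("Small", "Small", "None") 2).insert
      ("Small", "Small", "Small") 3).insert
      ("None", "Small", "None") 4).insert
      ("None", "None", "Small") 5).insert
      ("Large", "None", "None") 6).insert
      ("Large", "Large", "None") 7).insert
      ("Large", "Small", "None") 8).insert
      ("Large", "Small", "Small") 9).insert
      ("Large", "Large", "Small") 10).insert
      ("Large", "Large", "Large") 11
  -- m[class_triple] (KeyError = none) is never missing in this program: the triples are built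
  -- from a descending sort so they are non-increasing, and all of those are keys of m;
  -- hence the default 0 is never consulted
  (m.get? class_triple).getD 0

def observations_from_blocks (blocks : List (List (List Int))) : List Int :=
  blocks.foldl
    (fun observations block =>
      let observation := observation_from_block block
      let item_classes := (map_obs_item_to_class observation.1 10,
        map_obs_item_to_class observation.2.1 10, map_obs_item_to_class observation.2.2 10)
      observations ++ [class_triple_to_id item_classes]) []

-- ===== PORT B =====
def pvIdTable : PySem.Dict (Int × Int) Int :=
  (((((((((PySem.Dict.empty.insert (0, 0) 0).insert (0, 1) 1).insert (0, 2) 2).insert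
    (0, 3) 3).insert (1, 0) 6).insert (1, 1) 8).insert (1, 2) 9).insert
    (2, 0) 7).insert (2, 1) 10).insert (3, 0) 11

def observations_from_blocks_alt (blocks : List (List (List Int))) : List Int :=
  blocks.foldl
    (fun observations block =>
      let ls := block.foldl
        (fun (p : Int × Int) component =>
          let c := component.foldl (fun c value => if value == 0 then c + 1 else c) (0 : Int)
          if 10 ≤ c then (p.1 + 1, p.2) else if 1 ≤ c then (p.1, p.2 + 1) else p) (0, 0)
      let nl := min ls.1 3
      let ns := min ls.2 (3 - nl)
      -- _ID_TABLE[(nl, ns)] (KeyError = none) is never missing for clamped counters,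
      -- so the default 0 is never consulted
      observations ++ [(pvIdTable.get? (nl, ns)).getD 0]) []

-- ===== PRECONDITION & SPEC =====
def Spec_observations_from_blocks (blocks : List (List (List Int))) (out : List Int) : Prop := out = observations_from_blocks_alt blocks
instance (blocks : List (List (List Int))) (out : List Int) : Decidable (Spec_observations_from_blocks blocks out) := by unfold Spec_observations_from_blocks; infer_instance

-- ===== CLAIM (what is proved, stated in full; the proofs are below) =====
def Claim_equal_observations_from_blocks : Prop := ∀ (blocks : List (List (List Int))), Dom_observations_from_blocks blocks → Spec_observations_from_blocks blocks (observations_from_blocks blocks)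

-- ===== LEMMAS AND PROOFS =====

-- class code of a pixel count: 0 = 'None', 1 = 'Small', 2 = 'Large'
def pvCode (x : Int) : Int := if x = 0 then 0 else if x < 10 then 1 else 2

def pvStrOfCode (c : Int) : String :=
  if c = 0 then "None" else if c = 1 then "Small" else "Large"

theorem pv_mcls (x : Int) (_hx : 0 ≤ x) :
    map_obs_item_to_class x 10 = pvStrOfCode (pvCode x) := by
  unfold map_obs_item_to_class pvStrOfCode pvCode
  split_ifs <;> first | rfl | omega

theorem pv_sum_ones {α : Type} (l : List α) : (l.map (fun _ => (1 : Int))).sum = l.length := by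
  induction l with
  | nil => simp
  | cons x t ih => simp; omega

-- A's per-component black-pixel count is the count of zeros
theorem pv_cntA_eq (component : List Int) :
    ((component.filter (fun value => value == 0)).map (fun _ => (1 : Int))).sum
      = (component.count 0 : Int) := by
  rw [pv_sum_ones]
  simp [List.count_eq_countP, List.countP_eq_length_filter]

-- the padding loop appends zeros
theorem pv_zero_fold {α : Type} (r : List α) (init : List Int) :
    r.foldl (fun acc _ => acc ++ [(0 : Int)]) init = init ++ List.replicate r.length 0 := by
  induction r generalizing init with
  | nil => simp
  | cons x t ih =>
    rw [List.foldl_cons, ih, List.append_assoc]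
    simp [List.replicate_succ]

-- a list of codes is a permutation of its counts laid out as replicates
theorem pv_codes_perm (l : List Int) (h : ∀ x ∈ l, x = 0 ∨ x = 1 ∨ x = 2) :
    l.Perm (List.replicate (l.count 2) 2 ++ List.replicate (l.count 1) 1
      ++ List.replicate (l.count 0) 0) := by
  induction l with
  | nil => simp
  | cons x t ih =>
    have ht := ih (fun y hy => h y (List.mem_cons_of_mem _ hy))
    rcases h x List.mem_cons_self with rfl | rfl | rfl
    · refine (ht.cons 0).trans ?_
      simp only [List.count_cons]
      norm_num
      rw [List.replicate_succ]
      exact ((List.perm_middle (a := (0 : Int)) (l₁ := List.replicate (t.count 2) 2)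
          (l₂ := List.replicate (t.count 1) 1 ++ List.replicate (t.count 0) 0)).symm).trans
        (((List.perm_middle (a := (0 : Int)) (l₁ := List.replicate (t.count 1) 1)
          (l₂ := List.replicate (t.count 0) 0)).symm).append_left
            (List.replicate (t.count 2) 2))
    · refine (ht.cons 1).trans ?_
      simp only [List.count_cons]
      norm_num
      rw [List.replicate_succ]
      simp only [List.cons_append]
      exact (List.perm_middle (a := (1 : Int)) (l₁ := List.replicate (t.count 2) 2)
        (l₂ := List.replicate (t.count 1) 1 ++ List.replicate (t.count 0) 0)).symm
    · refine (ht.cons 2).trans ?_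
      simp [List.replicate_succ]

theorem pv_code_mono (a b : Int) (hb : 0 ≤ b) (hab : b ≤ a) : pvCode b ≤ pvCode a := by
  unfold pvCode; split_ifs <;> omega

theorem pv_codeP2 (x : Int) (_hx : 0 ≤ x) : (pvCode x == 2) = decide (10 ≤ x) := by
  unfold pvCode; split_ifs <;> simp_all

theorem pv_codeP1 (x : Int) (hx : 0 ≤ x) :
    (pvCode x == 1) = (decide (1 ≤ x) && !decide (10 ≤ x)) := by
  unfold pvCode; split_ifs <;> simp_all
  omega

theorem pv_codeP0 (x : Int) (_hx : 0 ≤ x) : (pvCode x == 0) = decide (x = 0) := by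
  unfold pvCode; split_ifs <;> simp_all

-- the codes of the descending sort of a nonnegative list are the class counts laid out in order
theorem pv_sorted_code (p : List Int) (hp : ∀ x ∈ p, 0 ≤ x) :
    (PySem.List.sorted p (fun x => x) true).map pvCode
      = List.replicate (p.countP (fun x => decide (10 ≤ x))) 2
        ++ List.replicate (p.countP (fun x => decide (1 ≤ x) && !decide (10 ≤ x))) 1
        ++ List.replicate (p.countP (fun x => decide (x = 0))) 0 := by
  have hperm : (PySem.List.sorted p (fun x => x) true).Perm p :=
    PySem.List.sorted_perm p (fun x => x) true
  set s := PySem.List.sorted p (fun x => x) true with hs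
  have hmem : ∀ x ∈ s, 0 ≤ x := fun x hx => hp x (hperm.mem_iff.mp hx)
  have hcodes : ∀ y ∈ s.map pvCode, y = 0 ∨ y = 1 ∨ y = 2 := by
    intro y hy
    obtain ⟨x, _, rfl⟩ := List.mem_map.mp hy
    unfold pvCode; split_ifs <;> omega
  have hP := pv_codes_perm (s.map pvCode) hcodes
  have hc2 : (s.map pvCode).count 2 = p.countP (fun x => decide (10 ≤ x)) := by
    rw [List.count_eq_countP, List.countP_map, hperm.countP_eq]
    exact List.countP_congr fun x hx => by
      rw [Function.comp_apply, pv_codeP2 x (hp x hx)]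
  have hc1 : (s.map pvCode).count 1
      = p.countP (fun x => decide (1 ≤ x) && !decide (10 ≤ x)) := by
    rw [List.count_eq_countP, List.countP_map, hperm.countP_eq]
    exact List.countP_congr fun x hx => by
      rw [Function.comp_apply, pv_codeP1 x (hp x hx)]
  have hc0 : (s.map pvCode).count 0 = p.countP (fun x => decide (x = 0)) := by
    rw [List.count_eq_countP, List.countP_map, hperm.countP_eq]
    exact List.countP_congr fun x hx => by
      rw [Function.comp_apply, pv_codeP0 x (hp x hx)]
  rw [hc2, hc1, hc0] at hP
  have h1 : s.Pairwise (fun a b => b ≤ a) := PySem.List.sorted_pairwise_rev p (fun x => x)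
  have h2 : (s.map pvCode).Pairwise (fun a b : Int => b ≤ a) :=
    List.pairwise_map.mpr (h1.imp_of_mem fun ha hb hr =>
      pv_code_mono _ _ (hmem _ hb) hr)
  have hRpw : (List.replicate (p.countP (fun x => decide (10 ≤ x))) (2 : Int)
      ++ List.replicate (p.countP (fun x => decide (1 ≤ x) && !decide (10 ≤ x))) 1
      ++ List.replicate (p.countP (fun x => decide (x = 0))) 0).Pairwise
        (fun a b => b ≤ a) := by
    rw [List.pairwise_append, List.pairwise_append]
    refine ⟨⟨List.pairwise_replicate.mpr (Or.inr (by norm_num)),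
      List.pairwise_replicate.mpr (Or.inr (by norm_num)), ?_⟩,
      List.pairwise_replicate.mpr (Or.inr (by norm_num)), ?_⟩
    · intro a ha b hb
      rw [List.eq_of_mem_replicate ha, List.eq_of_mem_replicate hb]
      norm_num
    · intro a ha b hb
      rw [List.eq_of_mem_replicate hb]
      rcases List.mem_append.mp ha with h | h <;>
        rw [List.eq_of_mem_replicate h] <;> norm_num
  exact List.Perm.eq_of_pairwise' h2 hRpw hP

-- B's two-counter loop counts large and small components
theorem pv_classify_fold (l : List (List Int)) (f : List Int → Int) (x y : Int) :
    l.foldl (fun p comp => if 10 ≤ f comp then (p.1 + 1, p.2)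
      else if 1 ≤ f comp then (p.1, p.2 + 1) else p) (x, y)
    = (x + (l.countP (fun comp => decide (10 ≤ f comp)) : Int),
       y + (l.countP (fun comp => decide (1 ≤ f comp) && !decide (10 ≤ f comp)) : Int)) := by
  induction l generalizing x y with
  | nil => simp
  | cons h t ih =>
    simp only [List.foldl_cons, List.countP_cons]
    by_cases h10 : 10 ≤ f h
    · rw [if_pos h10, ih]
      simp [h10]
      ring_nf
    · by_cases h1 : 1 ≤ f h
      · rw [if_neg h10, if_pos h1, ih]
        simp [h10, h1]
        ring_nf
      · rw [if_neg h10, if_neg h1, ih]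
        simp [h10, h1]

-- the heart of the equivalence: once the sorted codes are laid out as replicates,
-- the string-triple id equals the clamped-counter table lookup
theorem pv_main_case (a b c : Int) (r : List Int) (L S N : Nat)
    (ha : 0 ≤ a) (hb : 0 ≤ b) (hc : 0 ≤ c)
    (hcode : pvCode a :: pvCode b :: pvCode c :: r.map pvCode
      = List.replicate L 2 ++ List.replicate S 1 ++ List.replicate N 0)
    (nl ns : Int) (hnl : nl = min (L : Int) 3) (hns : ns = min (S : Int) (3 - nl)) :
    class_triple_to_id (map_obs_item_to_class a 10, map_obs_item_to_class b 10,
      map_obs_item_to_class c 10)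
    = (pvIdTable.get? (nl, ns)).getD 0 := by
  have hlen : 3 + r.length = L + S + N := by
    have h := congrArg List.length hcode
    simp at h
    omega
  rw [pv_mcls a ha, pv_mcls b hb, pv_mcls c hc]
  obtain rfl | rfl | rfl | hL : L = 0 ∨ L = 1 ∨ L = 2 ∨ 3 ≤ L := by omega
  · obtain rfl | rfl | rfl | hS : S = 0 ∨ S = 1 ∨ S = 2 ∨ 3 ≤ S := by omega
    · obtain ⟨k, rfl⟩ : ∃ k, N = 3 + k := ⟨r.length, by omega⟩
      simp only [List.replicate_add] at hcode
      simp at hcode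
      obtain ⟨h1, h2, h3, -⟩ := hcode
      rw [h1, h2, h3, show nl = 0 by omega, show ns = 0 by omega]
      decide
    · obtain ⟨k, rfl⟩ : ∃ k, N = 2 + k := ⟨r.length, by omega⟩
      simp only [List.replicate_add] at hcode
      simp at hcode
      obtain ⟨h1, h2, h3, -⟩ := hcode
      rw [h1, h2, h3, show nl = 0 by omega, show ns = 1 by omega]
      decide
    · obtain ⟨k, rfl⟩ : ∃ k, N = 1 + k := ⟨r.length, by omega⟩
      simp only [List.replicate_add] at hcode
      simp at hcode
      obtain ⟨h1, h2, h3, -⟩ := hcode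
      rw [h1, h2, h3, show nl = 0 by omega, show ns = 2 by omega]
      decide
    · obtain ⟨S', rfl⟩ := Nat.exists_eq_add_of_le hS
      simp only [List.replicate_add] at hcode
      simp at hcode
      obtain ⟨h1, h2, h3, -⟩ := hcode
      rw [h1, h2, h3, show nl = 0 by omega, show ns = 3 by omega]
      decide
  · obtain rfl | rfl | hS : S = 0 ∨ S = 1 ∨ 2 ≤ S := by omega
    · obtain ⟨k, rfl⟩ : ∃ k, N = 2 + k := ⟨r.length, by omega⟩
      simp only [List.replicate_add] at hcode
      simp at hcode
      obtain ⟨h1, h2, h3, -⟩ := hcode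
      rw [h1, h2, h3, show nl = 1 by omega, show ns = 0 by omega]
      decide
    · obtain ⟨k, rfl⟩ : ∃ k, N = 1 + k := ⟨r.length, by omega⟩
      simp only [List.replicate_add] at hcode
      simp at hcode
      obtain ⟨h1, h2, h3, -⟩ := hcode
      rw [h1, h2, h3, show nl = 1 by omega, show ns = 1 by omega]
      decide
    · obtain ⟨S', rfl⟩ := Nat.exists_eq_add_of_le hS
      simp only [List.replicate_add] at hcode
      simp at hcode
      obtain ⟨h1, h2, h3, -⟩ := hcode
      rw [h1, h2, h3, show nl = 1 by omega, show ns = 2 by omega]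
      decide
  · obtain rfl | hS : S = 0 ∨ 1 ≤ S := by omega
    · obtain ⟨k, rfl⟩ : ∃ k, N = 1 + k := ⟨r.length, by omega⟩
      simp only [List.replicate_add] at hcode
      simp at hcode
      obtain ⟨h1, h2, h3, -⟩ := hcode
      rw [h1, h2, h3, show nl = 2 by omega, show ns = 0 by omega]
      decide
    · obtain ⟨S', rfl⟩ := Nat.exists_eq_add_of_le hS
      simp only [List.replicate_add] at hcode
      simp at hcode
      obtain ⟨h1, h2, h3, -⟩ := hcode
      rw [h1, h2, h3, show nl = 2 by omega, show ns = 1 by omega]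
      decide
  · obtain ⟨L', rfl⟩ := Nat.exists_eq_add_of_le hL
    simp only [List.replicate_add] at hcode
    simp at hcode
    obtain ⟨h1, h2, h3, -⟩ := hcode
    rw [h1, h2, h3, show nl = 3 by omega, show ns = 0 by omega]
    decide

theorem pv_take3 {α : Type} (l : List α) (h : 3 ≤ l.length) :
    ∃ a b c r, l = a :: b :: c :: r := by
  match l with
  | a :: b :: c :: r => exact ⟨a, b, c, r, rfl⟩
  | [] | [_] | [_, _] => simp at h

-- per block, A's sort/classify/dict id equals B's clamped-counter table id
theorem pv_per_block (block : List (List Int)) :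
    class_triple_to_id
      (map_obs_item_to_class (observation_from_block block).1 10,
       map_obs_item_to_class (observation_from_block block).2.1 10,
       map_obs_item_to_class (observation_from_block block).2.2 10)
    = (let ls := block.foldl
        (fun (p : Int × Int) component =>
          let c := component.foldl (fun c value => if value == 0 then c + 1 else c) (0 : Int)
          if 10 ≤ c then (p.1 + 1, p.2) else if 1 ≤ c then (p.1, p.2 + 1) else p) (0, 0)
       let nl := min ls.1 3
       let ns := min ls.2 (3 - nl)
       (pvIdTable.get? (nl, ns)).getD 0) := by
  -- B side: the two-counter loop counts the large and the small components
  simp only [PySem.List.foldl_beq_add_one, zero_add]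
  rw [pv_classify_fold block (fun component => ((component.count 0 : Nat) : Int)) 0 0]
  simp only [zero_add]
  -- A side: the pixel list is the list of zero counts
  have hpix : List.foldl
      (fun acc component => acc ++
        [((component.filter (fun value => value == 0)).map (fun _ => (1 : Int))).sum])
      ([] : List Int) block
      = block.map (fun component => ((component.count 0 : Nat) : Int)) := by
    rw [PySem.List.foldl_append_singleton_eq_map, List.nil_append]
    exact List.map_congr_left fun comp _ => pv_cntA_eq comp
  simp only [observation_from_block]
  rw [hpix]
  set cnts := block.map (fun component => ((component.count 0 : Nat) : Int)) with hcnts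
  have hpad : (if cnts.length < 3 then
      (PySem.List.pyRange 0 (3 - (cnts.length : Int)) 1).foldl
        (fun acc _ => acc ++ [(0 : Int)]) cnts
    else cnts) = cnts ++ List.replicate (3 - cnts.length) 0 := by
    by_cases hl : cnts.length < 3
    · rw [if_pos hl, pv_zero_fold]
      congr 2
      rw [PySem.List.length_pyRange_one]
      omega
    · rw [if_neg hl]
      have h0 : 3 - cnts.length = 0 := by omega
      simp [h0]
  rw [hpad]
  set padded := cnts ++ List.replicate (3 - cnts.length) 0 with hpadded
  have hnn : ∀ x ∈ padded, 0 ≤ x := by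
    intro x hx
    rcases List.mem_append.mp hx with hx | hx
    · rw [hcnts] at hx
      obtain ⟨comp, -, rfl⟩ := List.mem_map.mp hx
      exact Int.natCast_nonneg _
    · rw [List.eq_of_mem_replicate hx]
  set s := PySem.List.sorted padded (fun x => x) true with hs
  have hcode := pv_sorted_code padded hnn
  rw [← hs] at hcode
  have hslen : 3 ≤ s.length := by
    rw [hs, PySem.List.length_sorted, hpadded]
    simp only [List.length_append, List.length_replicate]
    omega
  obtain ⟨a, b, c, r, hs3⟩ := pv_take3 s hslen
  have hmemS : ∀ x ∈ s, 0 ≤ x := by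
    intro x hx
    rw [hs, PySem.List.mem_sorted] at hx
    exact hnn x hx
  have ha : 0 ≤ a := hmemS a (by rw [hs3]; exact List.mem_cons_self)
  have hb : 0 ≤ b := hmemS b (by rw [hs3]; simp)
  have hc : 0 ≤ c := hmemS c (by rw [hs3]; simp)
  rw [hs3] at hcode ⊢
  simp only [List.map_cons] at hcode
  have e0 : PySem.List.pyGetD (a :: b :: c :: r) 0 0 = a := by simp [pysem]
  have e1 : PySem.List.pyGetD (a :: b :: c :: r) 1 0 = b := by simp [pysem]
  have e2 : PySem.List.pyGetD (a :: b :: c :: r) 2 0 = c := by simp [pysem]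
  rw [e0, e1, e2]
  have hrep0 : ∀ q : Int → Bool, q 0 = false →
      (List.replicate (3 - cnts.length) (0 : Int)).countP q = 0 := by
    intro q hq
    induction (3 - cnts.length) with
    | zero => simp
    | succ n ih => simp [List.replicate_succ, hq, ih]
  have hLc : padded.countP (fun x => decide (10 ≤ x))
      = block.countP (fun component => decide (10 ≤ ((component.count 0 : Nat) : Int))) := by
    rw [hpadded, List.countP_append, hrep0 _ (by norm_num), hcnts, List.countP_map]
    rfl
  have hSc : padded.countP (fun x => decide (1 ≤ x) && !decide (10 ≤ x))
      = block.countP (fun component => decide (1 ≤ ((component.count 0 : Nat) : Int))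
          && !decide (10 ≤ ((component.count 0 : Nat) : Int))) := by
    rw [hpadded, List.countP_append, hrep0 _ (by norm_num), hcnts, List.countP_map]
    rfl
  refine pv_main_case a b c r _ _ _ ha hb hc hcode _ _ ?_ ?_ <;> omega

-- ===== VERDICT (by name: the statement is the Claim_ definition above) =====
theorem observations_from_blocks_spec : Claim_equal_observations_from_blocks := by
  intro blocks _
  unfold Spec_observations_from_blocks observations_from_blocks observations_from_blocks_alt
  refine PySem.List.foldl_congr_mem _ _ _ _ ?_
  intro acc block _
  exact congrArg (fun z => acc ++ [z]) (pv_per_block block)
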